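-- pv_equiv track=rewrite | github.com/Jang-Angol/ProblemSolve | programmers/불량사용자.py | solution
-- ===== SOURCE A (Python) =====
-- def checkID(u_id,b_id):
--     if len(u_id) != len(b_id):
--         return False
--     for u,b in zip(u_id,b_id):
--         if b == '*':
--             continue
--         if u != b:
--             return False
--     return True
--
-- def solution(user_id, banned_id):
--     visited = [False] * len(user_id)
--     check = [] # 중복값이 없게
--     def dfs(depth,store):
--         if depth == len(banned_id):
--             a = sorted(store)
--             if a not in check:
--                 check.append(a)
--             return
--         for i in range(len(user_id)):
--             if len(user_id[i]) != len(banned_id[depth]):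
--                 continue
--             if checkID(user_id[i],banned_id[depth]) and not visited[i]:
--                 visited[i] = True
--                 store.append(user_id[i])
--                 dfs(depth+1,store)
--                 visited[i] = False
--                 store.pop()
--     dfs(0,[])
--     return len(check)
-- ===== SOURCE B (Python) =====
-- def checkID(u_id, b_id):
--     if len(u_id) != len(b_id):
--         return False
--     for u, b in zip(u_id, b_id):
--         if b == '*':
--             continue
--         if u != b:
--             return False
--     return True
--
-- def solution(user_id, banned_id):
--     # candidate user indices for each banned pattern
--     cands = [[i for i in range(len(user_id)) if checkID(user_id[i], b)] for b in banned_id]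
--     # breadth-wise cartesian product over candidate lists, keeping only combos of distinct indices
--     combos = [[]]
--     for cl in cands:
--         combos = [c + [i] for c in combos for i in cl if i not in c]
--     # dedup by the sorted tuple of matched user strings
--     seen = set()
--     for c in combos:
--         seen.add(tuple(sorted(user_id[i] for i in c)))
--     return len(seen)
-- ===== Notes on version B (the rewrite author's own statement) =====
-- stated objective: alternative
-- what changed: Replaced A's recursive DFS with a mutable visited array, backtracking store and list-membership dedup by precomputed candidate-index lists per banned pattern, an iterative breadth-wise cartesian-product fold that keeps only distinct-index combinations, and a set of sorted matched-string tuples whose size is returned.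
import Mathlib
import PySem

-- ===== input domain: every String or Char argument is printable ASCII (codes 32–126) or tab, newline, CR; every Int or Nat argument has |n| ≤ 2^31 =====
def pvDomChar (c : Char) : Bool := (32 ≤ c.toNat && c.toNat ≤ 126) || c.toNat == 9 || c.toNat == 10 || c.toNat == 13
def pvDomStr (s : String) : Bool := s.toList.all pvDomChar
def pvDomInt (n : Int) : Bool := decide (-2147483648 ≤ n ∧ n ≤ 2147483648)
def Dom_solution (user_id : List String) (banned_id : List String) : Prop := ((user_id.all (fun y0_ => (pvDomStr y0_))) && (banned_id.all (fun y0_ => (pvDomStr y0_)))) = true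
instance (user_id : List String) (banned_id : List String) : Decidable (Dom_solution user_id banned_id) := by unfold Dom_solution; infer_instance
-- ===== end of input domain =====

-- B replaces A's DFS-with-backtracking (mutable visited array, list-membership dedup) by
-- precomputed candidate-index lists, a breadth-wise cartesian-product fold over them, and a set
-- for dedup: an alternative decomposition of the same exponential search (objective: alternative).

-- ===== PORT A =====
-- shared module helper checkID (both Pythons use it); the zip loop with early return as recursion
def checkChars : List (Char × Char) → Bool
  | [] => true
  | (u, b) :: rest =>
      if b == '*' then checkChars rest
      else if u != b then false
      else checkChars rest

def checkID (u_id : String) (b_id : String) : Bool :=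
  if PySem.Str.len u_id ≠ PySem.Str.len b_id then false
  else checkChars (u_id.toList.zip b_id.toList)

-- A's nested dfs; visited/store are restored after each recursive call in Python, so they are
-- threaded as arguments; the `for i in range(len(user_id))` loop is a foldl over List.range
-- (i < len(user_id) always, so user_id[i] / visited[i] are getD with an unreachable default).
def dfsA (user_id : List String) : List String → List Bool → List String → List (List String) → List (List String)
  | [], _, store, check =>
      let a := PySem.List.sorted store (fun x => x) false
      if check.contains a then check else check ++ [a]
  | b :: rest, visited, store, check =>
      (List.range user_id.length).foldl
        (fun check i =>
          let u := user_id.getD i ""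
          if PySem.Str.len u ≠ PySem.Str.len b then check
          else if checkID u b && !(visited.getD i false) then
            dfsA user_id rest (visited.set i true) (store ++ [u]) check
          else check)
        check

def solution (user_id : List String) (banned_id : List String) : Int :=
  (dfsA user_id banned_id (List.replicate user_id.length false) [] []).length

-- ===== PORT B =====
def solution_alt (user_id : List String) (banned_id : List String) : Int :=
  let cands := banned_id.map (fun b =>
    (List.range user_id.length).filter (fun i => checkID (user_id.getD i "") b))
  let combos := cands.foldl
    (fun combos cl =>
      combos.flatMap (fun c => (cl.filter (fun i => !c.contains i)).map (fun i => c ++ [i])))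
    [[]]
  let seen := combos.foldl
    (fun s c => PySem.Set.add s (PySem.List.sorted (c.map (fun i => user_id.getD i "")) (fun x => x) false))
    PySem.Set.empty
  PySem.Set.len seen

-- ===== PRECONDITION & SPEC =====
def Spec_solution (user_id : List String) (banned_id : List String) (out : Int) : Prop := out = solution_alt user_id banned_id
instance (user_id : List String) (banned_id : List String) (out : Int) : Decidable (Spec_solution user_id banned_id out) := by unfold Spec_solution; infer_instance

-- ===== CLAIM (what is proved, stated in full; the proofs are below) =====
def Claim_equal_solution : Prop := ∀ (user_id : List String) (banned_id : List String), Dom_solution user_id banned_id → Spec_solution user_id banned_id (solution user_id banned_id)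

-- ===== LEMMAS AND PROOFS =====

-- depth-first product of the candidate lists, extending a fixed prefix combo c
def prodFrom : List (List Nat) → List Nat → List (List Nat)
  | [], c => [c]
  | cl :: cls, c => (cl.filter (fun i => !c.contains i)).flatMap (fun i => prodFrom cls (c ++ [i]))

-- visited list as a function of the set of used indices
def mark (c : List Nat) (n : Nat) : List Bool := (List.range n).map (fun j => c.contains j)

lemma mark_getD (c : List Nat) (n i : Nat) (h : i < n) :
    (mark c n).getD i false = c.contains i := by
  simp [mark, List.getD, h]

lemma mark_set (c : List Nat) (n i : Nat) :
    (mark c n).set i true = mark (c ++ [i]) n := by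
  apply List.ext_getElem
  · simp [mark]
  · intro j hj hj'
    simp only [mark] at hj ⊢
    rw [List.getElem_set]
    simp only [List.getElem_map, List.getElem_range, List.contains_append]
    by_cases hji : j = i
    · simp [hji]
    · have hij : ¬ i = j := fun h' => hji h'.symm
      simp [hij, hji]

lemma mark_nil (n : Nat) : mark [] n = List.replicate n false := by
  simp [mark, List.map_const']

-- the generic loop shape of A's inner for-loop
lemma foldl_if_flatMap {α β : Type} (g : List β → α → List β) (p : Nat → Bool)
    (h : Nat → List α) (xs : List Nat) (acc : List β) :
    xs.foldl (fun acc i => if p i then (h i).foldl g acc else acc) acc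
      = ((xs.filter p).flatMap h).foldl g acc := by
  induction xs generalizing acc with
  | nil => rfl
  | cons x xs ih =>
      by_cases hx : p x = true
      · simp [hx, ih, List.foldl_append]
      · simp [hx, ih]

-- B's product fold distributes over the starting list
lemma foldl_step_flatMap (cls : List (List Nat)) (xs : List (List Nat)) :
    cls.foldl
      (fun combos cl =>
        combos.flatMap (fun c => (cl.filter (fun i => !c.contains i)).map (fun i => c ++ [i])))
      xs
      = xs.flatMap (fun c => prodFrom cls c) := by
  induction cls generalizing xs with
  | nil => simp [prodFrom]
  | cons cl cls ih =>
      rw [List.foldl_cons, ih]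
      rw [List.flatMap_assoc]
      congr 1
      funext c
      simp [prodFrom, List.flatMap_map]

-- if the length test fails, checkID fails
lemma checkID_false_of_len (u b : String) (h : ¬ PySem.Str.len u = PySem.Str.len b) :
    checkID u b = false := by
  simp only [checkID]
  rw [if_pos h]

-- the key invariant: A's dfs from a marked prefix c equals the dedup-fold of B's product list
lemma dfsA_eq_fold (user_id : List String) (rest : List String) (c : List Nat) (check : List (List String)) :
    dfsA user_id rest (mark c user_id.length) (c.map (fun i => user_id.getD i "")) check
      = (prodFrom (rest.map (fun b =>
            (List.range user_id.length).filter (fun i => checkID (user_id.getD i "") b))) c).foldl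
          (fun ch c' =>
            let a := PySem.List.sorted (c'.map (fun i => user_id.getD i "")) (fun x => x) false
            if ch.contains a then ch else ch ++ [a])
          check := by
  induction rest generalizing c check with
  | nil => simp [dfsA, prodFrom]
  | cons b rest ih =>
      rw [dfsA, List.map_cons, prodFrom]
      have hbody : ∀ check,
          (List.range user_id.length).foldl
            (fun check i =>
              let u := user_id.getD i ""
              if PySem.Str.len u ≠ PySem.Str.len b then check
              else if checkID u b && !((mark c user_id.length).getD i false) then
                dfsA user_id rest ((mark c user_id.length).set i true)
                  ((c.map (fun i => user_id.getD i "")) ++ [u]) check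
              else check)
            check
          = (List.range user_id.length).foldl
            (fun check i =>
              if checkID (user_id.getD i "") b && !(c.contains i) then
                (prodFrom (rest.map (fun b =>
                  (List.range user_id.length).filter (fun i => checkID (user_id.getD i "") b))) (c ++ [i])).foldl
                  (fun ch c' =>
                    let a := PySem.List.sorted (c'.map (fun i => user_id.getD i "")) (fun x => x) false
                    if ch.contains a then ch else ch ++ [a])
                  check
              else check)
            check := by
        intro check
        apply PySem.List.foldl_congr_mem
        intro acc i hi
        have hlt : i < user_id.length := List.mem_range.mp hi
        by_cases hlen : PySem.Str.len (user_id.getD i "") = PySem.Str.len b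
        · simp only [hlen, ne_eq, not_true_eq_false, if_false, mark_getD c _ i hlt,
            mark_set c user_id.length i]
          by_cases hck : (checkID (user_id.getD i "") b && !(c.contains i)) = true
          · rw [if_pos hck, if_pos hck]
            have hms : List.map (fun j => user_id.getD j "") (c ++ [i])
                = List.map (fun j => user_id.getD j "") c ++ [user_id.getD i ""] := by simp
            rw [← hms]
            exact ih (c ++ [i]) acc
          · rw [if_neg hck, if_neg hck]
        · have hcf := checkID_false_of_len _ _ hlen
          simp only [List.getD_eq_getElem?_getD] at hcf hlen
          have hl2 : ¬ ((user_id[i]?.getD "").length = b.length) := by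
            intro h'
            apply hlen
            simp only [PySem.Str.len_eq, String.length_toList, h']
          simp [hl2, hcf]
      rw [hbody]
      rw [foldl_if_flatMap]
      congr 1
      congr 1
      rw [List.filter_filter]
      exact List.filter_congr (fun a _ => by rw [Bool.and_comm])

-- ===== VERDICT (by name: the statement is the Claim_ definition above) =====
theorem solution_spec : Claim_equal_solution := by
  intro user_id banned_id _
  unfold Spec_solution solution solution_alt
  dsimp only
  rw [← mark_nil]
  have h := dfsA_eq_fold user_id banned_id [] []
  simp only [List.map_nil] at h
  rw [h]
  rw [foldl_step_flatMap]
  simp only [List.flatMap_cons, List.flatMap_nil, List.append_nil]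
  rfl
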